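-- pv_equiv track=rewrite | github.com/hjyoon99/Algorithm | 프로그래머스/1/135808. 과일 장수/과일 장수.py | solution
-- ===== SOURCE A (Python) =====
-- def solution(k, m, score):
--     earned = 0
--
--     score.sort(reverse = True)
--     result = [score[i:i + m] for i in range(0, len(score), m)]
--
--
--     for arr in result:
--         if len(arr) == m:
--             arr.sort()
--             earned += arr[0] * m
--
--     return earned
-- ===== SOURCE B (Python) =====
-- def solution(k, m, score):
--     # Same in-place descending sort as A; then each full box's minimum sits at
--     # index i*m + m - 1, so one strided slice replaces per-box slicing+sorting.
--     score.sort(reverse=True)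
--     return m * sum(score[m - 1:(len(score) // m) * m:m])
-- ===== Notes on version B (the rewrite author's own statement) =====
-- stated objective: simpler
-- what changed: Instead of building m-sized sublists and sorting each sublist to find its minimum, B sorts once descending and reads every full box's minimum directly at its strided position via one slice score[m-1:(len//m)*m:m], with no per-box work.
import Mathlib
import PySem

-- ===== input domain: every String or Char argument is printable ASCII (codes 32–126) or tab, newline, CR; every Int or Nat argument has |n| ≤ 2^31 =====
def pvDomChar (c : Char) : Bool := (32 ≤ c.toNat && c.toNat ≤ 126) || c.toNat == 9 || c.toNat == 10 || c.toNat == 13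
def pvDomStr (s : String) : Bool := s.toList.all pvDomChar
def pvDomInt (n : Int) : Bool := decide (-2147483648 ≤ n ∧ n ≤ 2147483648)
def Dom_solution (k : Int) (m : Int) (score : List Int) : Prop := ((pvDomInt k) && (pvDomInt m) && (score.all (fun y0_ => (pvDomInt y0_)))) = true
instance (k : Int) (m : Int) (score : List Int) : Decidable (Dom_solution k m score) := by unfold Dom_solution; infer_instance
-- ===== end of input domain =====

-- B replaces A's per-box slice-and-sort with one strided slice over the descending
-- sort (simpler). A sorts `score` in place; B performs the same in-place sort, so
-- the equivalence proved here concerns the return value with identical mutation.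

-- ===== PORT A =====
def solution (k : Int) (m : Int) (score : List Int) : Int :=
  let s := PySem.List.sorted score (fun x => x) true
  let result := (PySem.List.pyRange 0 (s.length : Int) m).map
    (fun i => PySem.List.slice s (some i) (some (i + m)))
  result.foldl
    (fun earned arr =>
      if (arr.length : Int) = m then
        earned + (PySem.List.pyGet? (PySem.List.sorted arr (fun x => x) false) 0).getD 0 * m
      else earned) 0

-- ===== PORT B =====
def solution_alt (k : Int) (m : Int) (score : List Int) : Int :=
  let s := PySem.List.sorted score (fun x => x) true
  m * ((PySem.List.slice? s (some (m - 1))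
          (some (PySem.Int.floordiv (s.length : Int) m * m)) m).getD []).sum

-- ===== PRECONDITION & SPEC =====
-- Pre_ excludes exactly m = 0, where Python A raises ValueError (range step 0);
-- B raises ValueError there too (slice step 0).
def Pre_solution (k : Int) (m : Int) (score : List Int) : Prop := m ≠ 0
instance (k : Int) (m : Int) (score : List Int) : Decidable (Pre_solution k m score) := by unfold Pre_solution; infer_instance
def pvWitness_solution : Int × Int × List Int := (4, 3, [1, 2, 3, 1, 2, 3, 1])

def Spec_solution (k : Int) (m : Int) (score : List Int) (out : Int) : Prop := out = solution_alt k m score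
instance (k : Int) (m : Int) (score : List Int) (out : Int) : Decidable (Spec_solution k m score out) := by unfold Spec_solution; infer_instance

-- ===== CLAIM (what is proved, stated in full; the proofs are below) =====
def Claim_equal_solution : Prop := ∀ (k : Int) (m : Int) (score : List Int), Dom_solution k m score → Pre_solution k m score → Spec_solution k m score (solution k m score)

-- ===== LEMMAS AND PROOFS =====

-- the minimum that A computes for a full box: sorting the box ascending and taking
-- its head yields the box's last element, because s is descending
lemma chunk_min (s : List Int) (hs : List.Pairwise (fun a b : Int => b ≤ a) s)
    (M k : Nat) (hM : 0 < M) (hfull : M * k + M ≤ s.length) :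
    (PySem.List.pyGet? (PySem.List.sorted ((s.drop (M * k)).take M) (fun x => x) false) 0).getD 0
      = s.getD (M * k + M - 1) 0 := by
  set c : List Int := (s.drop (M * k)).take M with hc
  have hclen : c.length = M := by simp [hc]; omega
  have hcget : ∀ t : Nat, t < M → c.getD t 0 = s.getD (M * k + t) 0 := by
    intro t ht
    rw [List.getD_eq_getElem c 0 (by omega), List.getD_eq_getElem s 0 (by omega)]
    simp [hc]
  have hdesc : ∀ i j : Nat, i ≤ j → j < s.length → s.getD j 0 ≤ s.getD i 0 := by
    intro i j hi hj
    rw [List.getD_eq_getElem s 0 (show j < s.length from hj),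
        List.getD_eq_getElem s 0 (show i < s.length by omega)]
    rcases Nat.eq_or_lt_of_le hi with rfl | hlt
    · exact le_refl _
    · exact (List.pairwise_iff_getElem.mp hs) i j (by omega) hj hlt
  have hLmin : ∀ y ∈ c, c.getD (M - 1) 0 ≤ y := by
    intro y hy
    obtain ⟨t, ht, rfl⟩ := List.mem_iff_getElem.mp hy
    rw [← List.getD_eq_getElem c 0 ht, hcget (M - 1) (by omega), hcget t (by omega)]
    exact hdesc (M * k + t) (M * k + (M - 1)) (by omega) (by omega)
  have hcne : c ≠ [] := by
    intro h; rw [h] at hclen; simp at hclen; omega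
  rcases hsc : PySem.List.sorted c (fun x => x) false with _ | ⟨h, t⟩
  · exact absurd ((PySem.List.sorted_eq_nil_iff c (fun x => x) false).mp hsc) hcne
  · have hhead : ∀ y ∈ c, h ≤ y := PySem.List.key_head_sorted_le c (fun x => x) hsc
    have hmem : h ∈ c := by
      have : h ∈ PySem.List.sorted c (fun x => x) false := by
        rw [hsc]; exact List.mem_cons_self
      exact (PySem.List.mem_sorted c (fun x => x) false h).mp this
    have hLc : c.getD (M - 1) 0 ∈ c := by
      rw [List.getD_eq_getElem c 0 (by omega)]; exact List.getElem_mem _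
    have hval : h = c.getD (M - 1) 0 :=
      le_antisymm (hhead _ hLc) (hLmin h hmem)
    rw [hcget (M - 1) (by omega)] at hval
    have : M * k + (M - 1) = M * k + M - 1 := by omega
    rw [this] at hval
    rw [← hval]
    simp [PySem.List.pyGet?, PySem.List.pyIdx?]

-- A's loop over the boxes of a descending list, as a sum over the full boxes
lemma A_side (s : List Int) (hs : List.Pairwise (fun a b : Int => b ≤ a) s)
    (M : Nat) (hM : 0 < M) :
    (((PySem.List.pyRange 0 (s.length : Int) (M : Int)).map
        (fun i => PySem.List.slice s (some i) (some (i + (M : Int))))).foldl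
      (fun earned arr =>
        if (arr.length : Int) = (M : Int) then
          earned + (PySem.List.pyGet? (PySem.List.sorted arr (fun x => x) false) 0).getD 0 * (M : Int)
        else earned) 0)
    = ((List.range (s.length / M)).map
        (fun k => s.getD (M * k + M - 1) 0 * (M : Int))).sum := by
  have hMI : (0:Int) < (M:Int) := by exact_mod_cast hM
  set n := s.length with hn
  set q := n / M with hq
  set C := (n + M - 1) / M with hC
  have hrange : PySem.List.pyRange 0 (n : Int) (M : Int)
      = (List.range C).map (fun k => ((M * k : Nat) : Int)) := by
    rw [PySem.List.pyRange_of_pos 0 (n : Int) hMI]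
    rcases Nat.eq_zero_or_pos n with h0 | h0
    · have hC0 : C = 0 := by
        rw [hC, h0]
        exact Nat.div_eq_of_lt (by omega)
      rw [if_neg (by simp [h0]), hC0]
      simp
    · rw [if_pos (by exact_mod_cast h0)]
      rw [show ((n : Int) - 0 + (M : Int) - 1) = ((n + M - 1 : Nat) : Int) by
        push_cast [show (1:Nat) ≤ n + M by omega]; ring]
      rw [← Int.natCast_div, Int.toNat_natCast, ← hC]
      apply List.map_congr_left
      intro k _
      push_cast
      ring
  rw [hrange, List.map_map, List.foldl_map]
  simp only [Function.comp_apply]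
  refine Eq.trans (PySem.List.foldl_congr_mem (List.range C) _
    (fun (e : Int) (k : Nat) =>
      e + (if M * k + M ≤ n then s.getD (M * k + M - 1) 0 * (M : Int) else 0)) 0 ?_) ?_
  case _ =>
    intro acc k _
    rw [show ((M * k : Nat) : Int) + (M : Int) = ((M * k + M : Nat) : Int) by push_cast; ring,
      PySem.List.slice_natCast, show M * k + M - M * k = M by omega]
    by_cases hfull : M * k + M ≤ n
    · rw [if_pos (by
        simp only [List.length_take, List.length_drop]
        have h : min M (n - M * k) = M := by omega
        rw [← hn, h])]
      rw [chunk_min s hs M k hM hfull]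
      simp [hfull]
    · rw [if_neg (by
        simp only [List.length_take, List.length_drop, ← hn]
        have h : min M (n - M * k) ≠ M := by omega
        exact_mod_cast h)]
      simp [hfull]
  · rw [PySem.List.foldl_add]
    rw [show C = q + (C - q) from (by
      have : q ≤ C := Nat.div_le_div_right (by omega)
      omega)]
    rw [List.range_add, List.map_append, List.sum_append, List.map_map]
    have hz : ((List.range (C - q)).map
        ((fun k => if M * k + M ≤ n then s.getD (M * k + M - 1) 0 * (M : Int) else 0)
          ∘ (fun x => q + x))).sum = 0 := by
      apply List.sum_eq_zero
      intro x hx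
      simp only [List.mem_map] at hx
      obtain ⟨j, _, rfl⟩ := hx
      simp only [Function.comp]
      rw [if_neg ?_]
      have hdm : M * (n / M) + n % M = n := Nat.div_add_mod n M
      have hmod : n % M < M := Nat.mod_lt _ hM
      have e1 : M * (q + 1) = M * q + M := Nat.mul_succ M q
      have e2 : M * (q + j + 1) = M * (q + j) + M := Nat.mul_succ M (q + j)
      have h2 : M * (q + 1) ≤ M * (q + j + 1) :=
        Nat.mul_le_mul_left M (by omega)
      have e3 : M * (q + j) = M * q + M * j := Nat.mul_add M q j
      have h4 : 0 ≤ M * j := Nat.zero_le _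
      rw [hq] at *
      omega
    rw [hz, add_zero, zero_add]
    refine congrArg List.sum (List.map_congr_left ?_)
    intro k hk
    rw [if_pos ?_]
    have h1 : M * (k + 1) ≤ M * q := Nat.mul_le_mul_left M (List.mem_range.mp hk)
    have e1 : M * (k + 1) = M * k + M := Nat.mul_succ M k
    have h2 : M * q ≤ n := by rw [Nat.mul_comm, hq]; exact Nat.div_mul_le_self n M
    omega

-- B's strided slice over a descending list picks exactly the minima of the full boxes
lemma slice_strided (s : List Int) (M : Nat) (hM : 0 < M) :
    PySem.List.slice? s (some ((M:Int) - 1)) (some (((s.length / M : Nat) : Int) * M)) M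
      = some ((List.range (s.length / M)).map (fun j => s.getD (M * j + M - 1) 0)) := by
  have hMI : (0:Int) < (M:Int) := by exact_mod_cast hM
  have hq0 : (0:Int) ≤ ((s.length / M : Nat) : Int) * (M:Int) :=
    mul_nonneg (Int.natCast_nonneg _) (by omega)
  have hqM : s.length / M * M ≤ s.length := Nat.div_mul_le_self s.length M
  simp only [PySem.List.slice?, PySem.List.sliceIndices,
    if_neg (by omega : ¬((M:Int) = 0)), if_neg (by omega : ¬((M:Int) - 1 < 0)),
    if_neg (by omega : ¬((M:Int) < 0)), if_pos hMI, if_neg (not_lt.mpr hq0)]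
  rw [show min (((s.length / M : Nat) : Int) * (M:Int)) (s.length : Int)
      = ((s.length / M * M : Nat) : Int) by
    rw [← Nat.cast_mul]; exact min_eq_left (by exact_mod_cast hqM)]
  rcases Nat.eq_zero_or_pos (s.length / M) with hq | hq
  · rw [hq]
    rw [if_neg (by
      simp only [Nat.zero_mul, Nat.cast_zero]
      have : (0:Int) ≤ min ((M:Int) - 1) (s.length : Int) :=
        le_min (by omega) (by omega)
      omega)]
    simp
  · have hMn : M ≤ s.length := le_trans (by omega) (le_trans (Nat.mul_le_mul_right M hq) hqM)
    rw [show min ((M:Int) - 1) (s.length : Int) = (M:Int) - 1 from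
      min_eq_left (by
        have h' : (M:Int) ≤ (s.length : Int) := by exact_mod_cast hMn
        omega)]
    rw [if_pos (by
      have : (M:Int) ≤ ((s.length / M * M : Nat) : Int) := by
        exact_mod_cast Nat.le_mul_of_pos_left M hq
      omega)]
    rw [show (((s.length / M * M : Nat) : Int) - ((M:Int) - 1) + (M:Int) - 1)
        = ((s.length / M * M : Nat) : Int) by ring]
    rw [show (((s.length / M * M : Nat) : Int)) / (M:Int) = ((s.length / M : Nat) : Int) by
      rw [← Int.natCast_div, Nat.mul_div_cancel _ hM]]
    rw [Int.toNat_natCast]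
    congr 1
    rw [List.filterMap_congr (g := fun j => some (s.getD (M * j + M - 1) 0)) ?_]
    · exact congrFun (List.filterMap_eq_map (f := fun j => s.getD (M * j + M - 1) 0)) _
    · intro x hx
      have hxq : x < s.length / M := List.mem_range.mp hx
      have h1 : (1:Nat) ≤ M * x + M := by
        have := Nat.zero_le (M * x); omega
      have hidx : ((M:Int) - 1 + (M:Int) * (x:Int)) = ((M * x + M - 1 : Nat) : Int) := by
        push_cast [h1]; ring
      rw [hidx, Int.toNat_natCast]
      have hlt : M * x + M - 1 < s.length := by
        have h2 : M * x + M ≤ M * (s.length / M) := by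
          have := Nat.mul_le_mul_left M hxq
          rwa [Nat.mul_succ] at this
        have h3 : M * (s.length / M) ≤ s.length := by
          rw [Nat.mul_comm]; exact hqM
        omega
      simp [List.getElem?_eq_getElem hlt]

-- with a negative box size both programs see no full box and return 0
lemma main_neg (s : List Int) (m : Int) (hm : m < 0) :
    (((PySem.List.pyRange 0 (s.length : Int) m).map
        (fun i => PySem.List.slice s (some i) (some (i + m)))).foldl
      (fun earned arr =>
        if (arr.length : Int) = m then
          earned + (PySem.List.pyGet? (PySem.List.sorted arr (fun x => x) false) 0).getD 0 * m
        else earned) 0)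
    = m * ((PySem.List.slice? s (some (m - 1))
          (some (PySem.Int.floordiv (s.length : Int) m * m)) m).getD []).sum := by
  have hA : PySem.List.pyRange 0 (s.length : Int) m = [] := by
    simp only [PySem.List.pyRange, if_neg (by omega : ¬(m = 0)),
      if_neg (by omega : ¬(0 < m)), if_neg (by omega : ¬((s.length : Int) < 0))]
    simp
  rw [hA]
  have hstop : (s.length : Int) ≤ PySem.Int.floordiv (s.length : Int) m * m := by
    have h1 := PySem.Int.floordiv_mul_add_mod (s.length : Int) m
    have h2 := PySem.Int.mod_neg_bounds (s.length : Int) hm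
    omega
  have hstop0 : (0:Int) ≤ PySem.Int.floordiv (s.length : Int) m * m := by
    have : (0:Int) ≤ (s.length : Int) := by omega
    omega
  have hB : PySem.List.slice? s (some (m - 1))
      (some (PySem.Int.floordiv (s.length : Int) m * m)) m = some [] := by
    simp only [PySem.List.slice?, PySem.List.sliceIndices,
      if_neg (by omega : ¬(m = 0)), if_pos (by omega : m - 1 < 0),
      if_pos hm, if_neg (by omega : ¬(0 < m)), if_neg (not_lt.mpr hstop0)]
    rw [if_neg ?_]
    · simp
    · have h1 : max (m - 1 + (s.length : Int)) (-1) ≤ (s.length : Int) - 1 := by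
        apply max_le <;> omega
      have h2 : (s.length : Int) - 1 ≤ min (PySem.Int.floordiv (s.length : Int) m * m)
          ((s.length : Int) - 1) := le_min (by omega) le_rfl
      omega
  rw [hB]
  simp

-- ===== VERDICT (by name: the statement is the Claim_ definition above) =====
theorem solution_spec : Claim_equal_solution := by
  intro k m score _ hm
  show solution k m score = solution_alt k m score
  simp only [solution, solution_alt]
  set s := PySem.List.sorted score (fun x => x) true with hsdef
  have hs : List.Pairwise (fun a b : Int => b ≤ a) s :=
    PySem.List.sorted_pairwise_rev score (fun x => x)
  rcases lt_or_gt_of_ne hm with hneg | hpos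
  · exact main_neg s m hneg
  · lift m to ℕ using hpos.le with M
    have hM : 0 < M := by exact_mod_cast hpos
    rw [A_side s hs M hM, PySem.Int.floordiv_natCast, slice_strided s M hM,
      Option.getD_some, List.sum_map_mul_right, mul_comm]
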